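-- pv_equiv track=rewrite | github.com/aman7828/ai-secure-platform | analyzer/ai_insights.py | _threat_score_explanation
-- ===== SOURCE A (Python) =====
-- def _threat_score_explanation(findings: list) -> str:
--     if not findings:
--         return "Score is 0 — no sensitive patterns detected in the submitted content."
--
--     critical = [f for f in findings if f["risk"] == "critical"]
--     high     = [f for f in findings if f["risk"] == "high"]
--     medium   = [f for f in findings if f["risk"] == "medium"]
--     low      = [f for f in findings if f["risk"] == "low"]
--
--     parts = []
--     if critical:
--         parts.append(f"{len(critical)} critical finding(s) (+{len(critical)*10} pts)")
--     if high:
--         parts.append(f"{len(high)} high finding(s) (+{len(high)*5} pts)")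
--     if medium:
--         parts.append(f"{len(medium)} medium finding(s) (+{len(medium)*3} pts)")
--     if low:
--         parts.append(f"{len(low)} low finding(s) (+{len(low)*1} pts)")
--
--     return "Risk score composed of: " + ", ".join(parts) + "."
-- ===== SOURCE B (Python) =====
-- def _threat_score_explanation(findings: list) -> str:
--     if not findings:
--         return "Score is 0 — no sensitive patterns detected in the submitted content."
--
--     counts = {}
--     for f in findings:
--         r = f["risk"]
--         counts[r] = counts.get(r, 0) + 1
--
--     parts = []
--     for level, weight in (("critical", 10), ("high", 5), ("medium", 3), ("low", 1)):
--         c = counts.get(level, 0)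
--         if c:
--             parts.append(f"{c} {level} finding(s) (+{c * weight} pts)")
--
--     return "Risk score composed of: " + ", ".join(parts) + "."
-- ===== Notes on version B (the rewrite author's own statement) =====
-- stated objective: simpler
-- what changed: Replaces the four separate filter passes over findings with a single tally pass into a dict of per-risk counts, followed by a table-driven emit over (level, weight) pairs.
import Mathlib
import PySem

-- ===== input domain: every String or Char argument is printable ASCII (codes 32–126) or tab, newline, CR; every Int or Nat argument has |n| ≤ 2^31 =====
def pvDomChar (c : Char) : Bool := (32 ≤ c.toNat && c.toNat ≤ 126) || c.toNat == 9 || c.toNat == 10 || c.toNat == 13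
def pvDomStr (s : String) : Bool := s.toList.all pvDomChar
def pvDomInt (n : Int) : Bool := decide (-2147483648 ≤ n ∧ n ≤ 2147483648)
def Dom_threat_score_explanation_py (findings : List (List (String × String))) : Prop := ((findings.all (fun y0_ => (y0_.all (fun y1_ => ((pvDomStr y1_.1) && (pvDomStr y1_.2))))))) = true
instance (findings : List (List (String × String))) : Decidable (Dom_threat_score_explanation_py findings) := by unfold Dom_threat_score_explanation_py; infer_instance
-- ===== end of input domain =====

-- B replaces A's four filter passes over findings by one tally pass into a dict plus a
-- table-driven emit over (level, weight) pairs; same return value, objective: simpler.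

-- ===== PORT A =====
-- f["risk"] where f is a Python dict built from the pair list (duplicate keys: last wins).
-- Total stand-in returning "" where Python raises KeyError; Pre_ excludes those inputs.
def pvRisk (f : List (String × String)) : String := (PySem.Dict.ofList f).getD "risk" ""

def threat_score_explanation_py (findings : List (List (String × String))) : String :=
  if findings = [] then
    "Score is 0 — no sensitive patterns detected in the submitted content."
  else
    let critical := findings.filter (fun f => pvRisk f == "critical")
    let high := findings.filter (fun f => pvRisk f == "high")
    let medium := findings.filter (fun f => pvRisk f == "medium")
    let low := findings.filter (fun f => pvRisk f == "low")
    let parts : List String := []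
    let parts := if critical ≠ [] then
      parts ++ [PySem.Int.toStr (critical.length : Int) ++ " critical finding(s) (+" ++ PySem.Int.toStr ((critical.length : Int) * 10) ++ " pts)"] else parts
    let parts := if high ≠ [] then
      parts ++ [PySem.Int.toStr (high.length : Int) ++ " high finding(s) (+" ++ PySem.Int.toStr ((high.length : Int) * 5) ++ " pts)"] else parts
    let parts := if medium ≠ [] then
      parts ++ [PySem.Int.toStr (medium.length : Int) ++ " medium finding(s) (+" ++ PySem.Int.toStr ((medium.length : Int) * 3) ++ " pts)"] else parts
    let parts := if low ≠ [] then
      parts ++ [PySem.Int.toStr (low.length : Int) ++ " low finding(s) (+" ++ PySem.Int.toStr ((low.length : Int) * 1) ++ " pts)"] else parts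
    "Risk score composed of: " ++ PySem.Str.join ", " parts ++ "."

-- ===== PORT B =====
def threat_score_explanation_py_alt (findings : List (List (String × String))) : String :=
  if findings = [] then
    "Score is 0 — no sensitive patterns detected in the submitted content."
  else
    let counts := findings.foldl (fun d f => let r := pvRisk f; d.insert r (d.getD r 0 + 1)) (PySem.Dict.empty : PySem.Dict String Int)
    let parts := [("critical", (10 : Int)), ("high", 5), ("medium", 3), ("low", 1)].foldl
      (fun parts lw =>
        let c := counts.getD lw.1 0
        if c ≠ 0 then
          parts ++ [PySem.Int.toStr c ++ " " ++ lw.1 ++ " finding(s) (+" ++ PySem.Int.toStr (c * lw.2) ++ " pts)"] else parts)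
      ([] : List String)
    "Risk score composed of: " ++ PySem.Str.join ", " parts ++ "."

-- ===== PRECONDITION & SPEC =====
-- Pre_ excludes exactly the findings that lack a "risk" key, on which Python A (and B) raise KeyError.
def Pre_threat_score_explanation_py (findings : List (List (String × String))) : Prop :=
  ∀ f ∈ findings, "risk" ∈ f.map Prod.fst
instance (findings : List (List (String × String))) : Decidable (Pre_threat_score_explanation_py findings) := by unfold Pre_threat_score_explanation_py; infer_instance

def pvWitness_threat_score_explanation_py : (List (List (String × String))) := [[("risk", "high")], [("risk", "low"), ("id", "7")]]

def Spec_threat_score_explanation_py (findings : List (List (String × String))) (out : String) : Prop := out = threat_score_explanation_py_alt findings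
instance (findings : List (List (String × String))) (out : String) : Decidable (Spec_threat_score_explanation_py findings out) := by unfold Spec_threat_score_explanation_py; infer_instance

-- ===== CLAIM (what is proved, stated in full; the proofs are below) =====
def Claim_equal_threat_score_explanation_py : Prop := ∀ (findings : List (List (String × String))), Dom_threat_score_explanation_py findings → Pre_threat_score_explanation_py findings → Spec_threat_score_explanation_py findings (threat_score_explanation_py findings)

-- ===== LEMMAS AND PROOFS =====

-- B's tally dict looked up at a level equals the length of A's filter for that level.
theorem counts_getD (findings : List (List (String × String))) (s : String) :
    (findings.foldl (fun d f => let r := pvRisk f; d.insert r (d.getD r 0 + 1)) (PySem.Dict.empty : PySem.Dict String Int)).getD s 0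
      = ((findings.filter (fun f => pvRisk f == s)).length : Int) := by
  have h := List.foldl_map (f := pvRisk)
    (g := fun (d : PySem.Dict String Int) r => d.insert r (d.getD r 0 + 1))
    (l := findings) (init := (PySem.Dict.empty : PySem.Dict String Int))
  simp only [← h, PySem.Dict.getD_foldl_insert_add_one, PySem.Dict.getD_empty, zero_add]
  rw [List.count_eq_countP, List.countP_map, ← List.countP_eq_length_filter]
  simp [Function.comp_def]

-- ===== VERDICT (by name: the statement is the Claim_ definition above) =====
theorem threat_score_explanation_py_spec : Claim_equal_threat_score_explanation_py := by
  intro findings _ _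
  unfold Spec_threat_score_explanation_py threat_score_explanation_py threat_score_explanation_py_alt
  by_cases hemp : findings = []
  · simp [hemp]
  · simp only [if_neg hemp, List.foldl, counts_getD]
    simp [← List.length_eq_zero_iff, Int.natCast_eq_zero]
    simp [String.append_assoc]
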